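-- pv_equiv track=rewrite | github.com/MrBrantCode/unitest_baseline | mut_generate/mist_train_taco/taco_10240/solution.py | find_max_bitonic_subarray_length
-- ===== SOURCE A (Python) =====
-- def find_max_bitonic_subarray_length(arr, n):
--     if n == 0:
--         return 0
--
--     maxLen = 1
--     start = 0
--     nextStart = 0
--     j = 0
--
--     while j < n - 1:
--         while j < n - 1 and arr[j] <= arr[j + 1]:
--             j += 1
--         while j < n - 1 and arr[j] >= arr[j + 1]:
--             if j < n - 1 and arr[j] > arr[j + 1]:
--                 nextStart = j + 1
--             j += 1
--         maxLen = max(maxLen, j - (start - 1))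
--         start = nextStart
--
--     return maxLen
-- ===== SOURCE B (Python) =====
-- def find_max_bitonic_subarray_length(arr, n):
--     if n == 0:
--         return 0
--     inc = []
--     up = 0
--     for i in range(n):
--         up = up + 1 if i > 0 and arr[i - 1] <= arr[i] else 1
--         inc.append(up)
--     best = 1
--     down = 0
--     for i in range(n - 1, -1, -1):
--         down = down + 1 if i < n - 1 and arr[i] >= arr[i + 1] else 1
--         best = max(best, inc[i] + down - 1)
--     return best
-- ===== Notes on version B (the rewrite author's own statement) =====
-- stated objective: alternative
-- what changed: Replaces A's nested while-loop two-pointer scan (with start/nextStart bookkeeping) by the classic two-pass DP: a left-to-right pass building the non-decreasing run length ending at each index, and a right-to-left pass combining it with the non-increasing run length starting there, returning max(inc[i]+dec[i]-1).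
import Mathlib
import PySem

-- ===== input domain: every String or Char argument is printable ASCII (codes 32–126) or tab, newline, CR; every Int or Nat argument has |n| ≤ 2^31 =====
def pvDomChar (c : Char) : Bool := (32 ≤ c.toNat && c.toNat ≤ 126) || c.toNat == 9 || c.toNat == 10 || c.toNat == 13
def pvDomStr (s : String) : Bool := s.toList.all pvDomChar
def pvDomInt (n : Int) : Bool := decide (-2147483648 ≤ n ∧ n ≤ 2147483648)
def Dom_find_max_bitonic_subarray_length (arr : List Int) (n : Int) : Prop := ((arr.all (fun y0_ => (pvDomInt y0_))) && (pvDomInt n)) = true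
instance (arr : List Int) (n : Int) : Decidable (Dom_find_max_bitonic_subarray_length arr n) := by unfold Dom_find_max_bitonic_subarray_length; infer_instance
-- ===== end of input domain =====

-- B replaces A's nested-while two-pointer scan by a two-pass inc/dec DP
-- (a genuinely different algorithm of the same cost; return values agree on all of Pre_).


-- ===== PORT A =====
-- arr[j] is ported as PySem.List.pyGetD arr j 0: exact whenever 0 ≤ j < arr.length,
-- which holds for every access A performs on inputs admitted by Pre_ below.

-- inner loop 1: while j < n - 1 and arr[j] <= arr[j + 1]: j += 1
def pvAUp (arr : List Int) (n j : Int) : Int :=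
  if h : j < n - 1 ∧ PySem.List.pyGetD arr j 0 ≤ PySem.List.pyGetD arr (j + 1) 0 then
    pvAUp arr n (j + 1)
  else j
termination_by (n - 1 - j).toNat
decreasing_by omega

-- inner loop 2: while j < n - 1 and arr[j] >= arr[j + 1]: …; returns (j, nextStart)
def pvADown (arr : List Int) (n j nextStart : Int) : Int × Int :=
  if h : j < n - 1 ∧ PySem.List.pyGetD arr j 0 ≥ PySem.List.pyGetD arr (j + 1) 0 then
    pvADown arr n (j + 1)
      (if j < n - 1 ∧ PySem.List.pyGetD arr j 0 > PySem.List.pyGetD arr (j + 1) 0 then j + 1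
       else nextStart)
  else (j, nextStart)
termination_by (n - 1 - j).toNat
decreasing_by omega

-- outer loop of A; state (maxLen, start, nextStart, j). The loop terminates because j
-- strictly increases in every iteration (proved in pvAProgress below); fuel = n.toNat is a
-- structural totality guard that is never exhausted, it does not change the algorithm.
def pvAOuter (arr : List Int) (n maxLen start nextStart j : Int) : Nat → Int
  | 0 => maxLen
  | fuel + 1 =>
    if j < n - 1 then
      let j1 := pvAUp arr n j
      let p := pvADown arr n j1 nextStart
      pvAOuter arr n (max maxLen (p.1 - (start - 1))) p.2 p.2 p.1 fuel
    else maxLen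

def find_max_bitonic_subarray_length (arr : List Int) (n : Int) : Int :=
  if n = 0 then 0 else pvAOuter arr n 1 0 0 0 n.toNat

-- ===== PORT B =====
-- two-pass DP from Source B: the first loop builds inc (non-decreasing run length ending at i),
-- the second scans right-to-left carrying the non-increasing run length and the running best.
def find_max_bitonic_subarray_length_alt (arr : List Int) (n : Int) : Int :=
  if n = 0 then 0
  else
    let s1 := (PySem.List.pyRange 0 n 1).foldl
      (fun (st : List Int × Int) i =>
        let up := if 0 < i ∧ PySem.List.pyGetD arr (i - 1) 0 ≤ PySem.List.pyGetD arr i 0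
                  then st.2 + 1 else 1
        (st.1 ++ [up], up)) ([], 0)
    let s2 := (PySem.List.pyRange (n - 1) (-1) (-1)).foldl
      (fun (st : Int × Int) i =>
        let down := if i < n - 1 ∧ PySem.List.pyGetD arr i 0 ≥ PySem.List.pyGetD arr (i + 1) 0
                    then st.2 + 1 else 1
        (max st.1 (PySem.List.pyGetD s1.1 i 0 + down - 1), down)) (1, 0)
    s2.1

-- ===== PRECONDITION & SPEC =====
-- Pre_ excludes exactly the inputs with n ≥ 2 and n > len(arr), on which the Python A
-- (and B alike) raises IndexError; A returns a value on every admitted input.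
def Pre_find_max_bitonic_subarray_length (arr : List Int) (n : Int) : Prop :=
  n ≤ (arr.length : Int) ∨ n ≤ 1
instance (arr : List Int) (n : Int) : Decidable (Pre_find_max_bitonic_subarray_length arr n) := by
  unfold Pre_find_max_bitonic_subarray_length; infer_instance

def pvWitness_find_max_bitonic_subarray_length : List Int × Int := ([1, 3, 2], 3)

def Spec_find_max_bitonic_subarray_length (arr : List Int) (n : Int) (out : Int) : Prop := out = find_max_bitonic_subarray_length_alt arr n
instance (arr : List Int) (n : Int) (out : Int) : Decidable (Spec_find_max_bitonic_subarray_length arr n out) := by unfold Spec_find_max_bitonic_subarray_length; infer_instance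

-- ===== CLAIM (what is proved, stated in full; the proofs are below) =====
def Claim_equal_find_max_bitonic_subarray_length : Prop := ∀ (arr : List Int) (n : Int), Dom_find_max_bitonic_subarray_length arr n → Pre_find_max_bitonic_subarray_length arr n → Spec_find_max_bitonic_subarray_length arr n (find_max_bitonic_subarray_length arr n)

-- ===== LEMMAS AND PROOFS =====

-- A's outer while loop makes progress: j strictly increases in every iteration
theorem pvAUp_ge (arr : List Int) (n j : Int) : j ≤ pvAUp arr n j := by
  fun_induction pvAUp with
  | case1 j h ih => omega
  | case2 j h => omega

theorem pvADown_fst_ge (arr : List Int) (n j ns : Int) : j ≤ (pvADown arr n j ns).1 := by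
  fun_induction pvADown with
  | case1 j ns h ih => simp only [dite_eq_ite] at ih; omega
  | case2 j ns h => omega

theorem pvAProgress (arr : List Int) (n j ns : Int) (h : j < n - 1) :
    j < (pvADown arr n (pvAUp arr n j) ns).1 := by
  by_cases hup : j < pvAUp arr n j
  · exact lt_of_lt_of_le hup (pvADown_fst_ge arr n _ ns)
  · have hj : pvAUp arr n j = j := le_antisymm (by omega) (pvAUp_ge arr n j)
    rw [hj]
    rw [pvAUp] at hj
    split at hj
    · have := pvAUp_ge arr n (j + 1); omega
    · rename_i hcond
      have hge : PySem.List.pyGetD arr j 0 ≥ PySem.List.pyGetD arr (j + 1) 0 := by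
        by_contra hlt
        exact hcond ⟨h, by omega⟩
      rw [pvADown, dif_pos ⟨h, hge⟩]
      exact lt_of_lt_of_le (by omega) (pvADown_fst_ge arr n (j + 1) _)

-- length of the longest non-decreasing run of arr ending at index i
def pvIncF (arr : List Int) (i : Int) : Int :=
  if h : 0 < i ∧ PySem.List.pyGetD arr (i - 1) 0 ≤ PySem.List.pyGetD arr i 0 then
    pvIncF arr (i - 1) + 1
  else 1
termination_by i.toNat
decreasing_by omega

-- length of the longest non-increasing run of arr starting at index i (within [0, n))
def pvDecF (arr : List Int) (n i : Int) : Int :=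
  if h : i < n - 1 ∧ PySem.List.pyGetD arr i 0 ≥ PySem.List.pyGetD arr (i + 1) 0 then
    pvDecF arr n (i + 1) + 1
  else 1
termination_by (n - 1 - i).toNat
decreasing_by omega

-- max over i ∈ [j, n-1] of incF i + decF i - 1
def pvSmax (arr : List Int) (n j : Int) : Int :=
  if h : j < n - 1 then
    max (pvIncF arr j + pvDecF arr n j - 1) (pvSmax arr n (j + 1))
  else pvIncF arr j + pvDecF arr n j - 1
termination_by (n - 1 - j).toNat
decreasing_by omega

-- max over i ∈ [0, j] of incF i + decF i - 1
def pvPmax (arr : List Int) (n j : Int) : Int :=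
  if h : 0 < j then
    max (pvIncF arr j + pvDecF arr n j - 1) (pvPmax arr n (j - 1))
  else pvIncF arr j + pvDecF arr n j - 1
termination_by j.toNat
decreasing_by omega

theorem pvIncF_pos (arr : List Int) (i : Int) : 1 ≤ pvIncF arr i := by
  fun_induction pvIncF with
  | case1 i h ih => omega
  | case2 i h => omega

theorem pvDecF_pos (arr : List Int) (n i : Int) : 1 ≤ pvDecF arr n i := by
  fun_induction pvDecF with
  | case1 i h ih => omega
  | case2 i h => omega

theorem pvIncF_step (arr : List Int) (i : Int) : pvIncF arr i ≤ pvIncF arr (i - 1) + 1 := by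
  rw [pvIncF]
  split
  · omega
  · have := pvIncF_pos arr (i - 1); omega

theorem pvDecF_step (arr : List Int) (n i : Int) : pvDecF arr n i ≤ pvDecF arr n (i + 1) + 1 := by
  rw [pvDecF]
  split
  · omega
  · have := pvDecF_pos arr n (i + 1); omega

theorem pvIncF_chain (arr : List Int) : ∀ (k : Nat) (i j : Int), i ≤ j → j - i = k →
    pvIncF arr j ≤ pvIncF arr i + (j - i) := by
  intro k
  induction k with
  | zero =>
      intro i j h1 h2
      obtain rfl : i = j := by omega
      omega
  | succ k ih =>
      intro i j h1 h2
      have h3 := pvIncF_step arr j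
      have h4 := ih i (j - 1) (by omega) (by omega)
      omega

theorem pvDecF_chain (arr : List Int) (n : Int) : ∀ (k : Nat) (i j : Int), i ≤ j → j - i = k →
    pvDecF arr n i ≤ pvDecF arr n j + (j - i) := by
  intro k
  induction k with
  | zero =>
      intro i j h1 h2
      obtain rfl : i = j := by omega
      omega
  | succ k ih =>
      intro i j h1 h2
      have h3 := pvDecF_step arr n i
      have h4 := ih (i + 1) j (by omega) (by omega)
      omega

theorem pvDecF_eq_one (arr : List Int) (n i : Int)
    (h : i = n - 1 ∨ PySem.List.pyGetD arr i 0 < PySem.List.pyGetD arr (i + 1) 0) :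
    pvDecF arr n i = 1 := by
  rw [pvDecF, dif_neg (by omega)]

-- aUp climbs to the end of the non-decreasing run, preserving the incF invariant
theorem pvAUp_spec (arr : List Int) (n j : Int) : ∀ (s : Int), j ≤ n - 1 → 0 ≤ j →
    pvIncF arr j = j - s + 1 →
    pvAUp arr n j ≤ n - 1 ∧ 0 ≤ pvAUp arr n j ∧
    pvIncF arr (pvAUp arr n j) = pvAUp arr n j - s + 1 ∧
    (pvAUp arr n j = n - 1 ∨
      ¬ PySem.List.pyGetD arr (pvAUp arr n j) 0 ≤ PySem.List.pyGetD arr (pvAUp arr n j + 1) 0) := by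
  fun_induction pvAUp arr n j with
  | case1 j h ih =>
      intro s hle h0 hinc
      have hinc' : pvIncF arr (j + 1) = (j + 1) - s + 1 := by
        rw [pvIncF, dif_pos ⟨by omega, by rw [show j + 1 - 1 = j from by ring]; exact h.2⟩,
          show j + 1 - 1 = j from by ring]
        omega
      exact ih s (by omega) (by omega) hinc'
  | case2 j h =>
      intro s hle h0 hinc
      refine ⟨hle, h0, hinc, ?_⟩
      by_cases hj : j = n - 1
      · exact Or.inl hj
      · refine Or.inr ?_
        intro hle'
        exact h ⟨by omega, hle'⟩

-- aDown descends the non-increasing run tracking nextStart; characterises decF and incF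
theorem pvADown_spec (arr : List Int) (n j ns : Int) : j ≤ n - 1 → 0 ≤ ns → ns ≤ j →
    pvIncF arr j = j - ns + 1 →
    j ≤ (pvADown arr n j ns).1 ∧ (pvADown arr n j ns).1 ≤ n - 1 ∧
    ns ≤ (pvADown arr n j ns).2 ∧ (pvADown arr n j ns).2 ≤ (pvADown arr n j ns).1 ∧
    pvIncF arr (pvADown arr n j ns).1 = (pvADown arr n j ns).1 - (pvADown arr n j ns).2 + 1 ∧
    pvDecF arr n j = (pvADown arr n j ns).1 - j + 1 ∧
    ((pvADown arr n j ns).1 = n - 1 ∨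
      PySem.List.pyGetD arr (pvADown arr n j ns).1 0 <
        PySem.List.pyGetD arr ((pvADown arr n j ns).1 + 1) 0) := by
  fun_induction pvADown arr n j ns with
  | case1 j ns h ih =>
      intro hle h0 hnsle hinc
      simp only [dite_eq_ite] at ih
      have hdec : pvDecF arr n j = pvDecF arr n (j + 1) + 1 := by
        rw [pvDecF, dif_pos h]
      by_cases hstrict : PySem.List.pyGetD arr j 0 > PySem.List.pyGetD arr (j + 1) 0
      · have hcond : (j < n - 1 ∧ PySem.List.pyGetD arr j 0 > PySem.List.pyGetD arr (j + 1) 0) :=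
          ⟨h.1, hstrict⟩
        rw [if_pos hcond] at ih ⊢
        have hinc' : pvIncF arr (j + 1) = (j + 1) - (j + 1) + 1 := by
          rw [pvIncF, dif_neg (by rw [show j + 1 - 1 = j from by ring]; omega)]
          omega
        obtain ⟨d1, d2, d3, d4, d5, d6, d7⟩ := ih (by omega) (by omega) (by omega) hinc'
        refine ⟨by omega, by omega, by omega, by omega, d5, by omega, d7⟩
      · have hcond : ¬ (j < n - 1 ∧ PySem.List.pyGetD arr j 0 > PySem.List.pyGetD arr (j + 1) 0) := by
          intro hc; exact hstrict hc.2
        rw [if_neg hcond] at ih ⊢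
        have hinc' : pvIncF arr (j + 1) = (j + 1) - ns + 1 := by
          rw [pvIncF, dif_pos ⟨by omega, by rw [show j + 1 - 1 = j from by ring]; omega⟩]
          rw [show j + 1 - 1 = j from by ring]
          omega
        obtain ⟨d1, d2, d3, d4, d5, d6, d7⟩ := ih (by omega) (by omega) (by omega) hinc'
        refine ⟨by omega, by omega, by omega, by omega, d5, by omega, d7⟩
  | case2 j ns h =>
      intro hle h0 hnsle hinc
      dsimp only
      have hdec : pvDecF arr n j = 1 := by rw [pvDecF, dif_neg h]
      refine ⟨by omega, by omega, by omega, by omega, hinc, by omega, ?_⟩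
      by_cases hj : j = n - 1
      · exact Or.inl hj
      · refine Or.inr ?_
        by_contra hlt
        exact h ⟨by omega, by omega⟩

-- every index in [j, n-1] contributes at most smax j
theorem pvSmax_ge (arr : List Int) (n j : Int) : ∀ (i : Int), j ≤ i → i ≤ n - 1 →
    pvIncF arr i + pvDecF arr n i - 1 ≤ pvSmax arr n j := by
  fun_induction pvSmax arr n j with
  | case1 j h ih =>
      intro i h1 h2
      by_cases hij : i = j
      · subst hij; exact le_max_left _ _
      · exact le_trans (ih i (by omega) h2) (le_max_right _ _)
  | case2 j h =>
      intro i h1 h2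
      obtain rfl : i = j := by omega
      omega

theorem pvSmax_mono (arr : List Int) (n j : Int) : ∀ (j' : Int), j ≤ j' → j' ≤ n - 1 →
    pvSmax arr n j' ≤ pvSmax arr n j := by
  fun_induction pvSmax arr n j with
  | case1 j h ih =>
      intro j' h1 h2
      by_cases hjj : j' = j
      · subst hjj
        rw [pvSmax, dif_pos h]
      · exact le_trans (ih j' (by omega) h2) (le_max_right _ _)
  | case2 j h =>
      intro j' h1 h2
      obtain rfl : j' = j := by omega
      rw [pvSmax, dif_neg h]

theorem pvSmax_le (arr : List Int) (n V : Int) : ∀ (k : Nat) (j j2 : Int), j ≤ j2 → j2 - j = k →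
    j2 ≤ n - 1 →
    (∀ i : Int, j ≤ i → i ≤ j2 → pvIncF arr i + pvDecF arr n i - 1 ≤ V) →
    pvSmax arr n j ≤ max V (pvSmax arr n j2) := by
  intro k
  induction k with
  | zero =>
      intro j j2 h1 h2 h3 h4
      obtain rfl : j = j2 := by omega
      exact le_max_right _ _
  | succ k ih =>
      intro j j2 h1 h2 h3 h4
      have hj : j < n - 1 := by omega
      rw [pvSmax, dif_pos hj]
      have hterm : pvIncF arr j + pvDecF arr n j - 1 ≤ V := h4 j (by omega) (by omega)
      have hrest := ih (j + 1) j2 (by omega) (by omega) h3 (fun i hi1 hi2 => h4 i (by omega) hi2)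
      omega

-- A's outer loop never runs out of fuel
theorem pvAOuter_exit (arr : List Int) (n maxLen start nextStart j : Int) (fuel : Nat)
    (h : ¬ j < n - 1) : pvAOuter arr n maxLen start nextStart j fuel = maxLen := by
  cases fuel with
  | zero => rfl
  | succ fuel => rw [pvAOuter, if_neg h]

-- the key loop invariant of A's outer loop
theorem pvAOuter_eq (arr : List Int) (n : Int) : ∀ (fuel : Nat) (j s maxLen : Int),
    (n - 1 - j).toNat < fuel → 0 ≤ s → s ≤ j → j < n - 1 → pvIncF arr j = j - s + 1 →
    pvAOuter arr n maxLen s s j fuel = max maxLen (pvSmax arr n j) := by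
  intro fuel
  induction fuel with
  | zero => intro j s maxLen hk; omega
  | succ fuel ih =>
      intro j s maxLen hk hs hsj hj hinc
      rw [pvAOuter, if_pos hj]
      dsimp only
      obtain ⟨hu1, hu2, hu3, hu4⟩ := pvAUp_spec arr n j s (by omega) (by omega) hinc
      have hge := pvAUp_ge arr n j
      set j1 := pvAUp arr n j with hj1
      obtain ⟨hd1, hd2, hd3, hd4, hd5, hd6, hd7⟩ :=
        pvADown_spec arr n j1 s hu1 (by omega) (by omega) hu3
      set p := pvADown arr n j1 s with hp
      have hprog : j < p.1 := pvAProgress arr n j s hj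
      have hdec1 : pvDecF arr n p.1 = 1 := pvDecF_eq_one arr n p.1 hd7
      have hV : pvIncF arr j1 + pvDecF arr n j1 - 1 = p.1 - (s - 1) := by omega
      have hbound : ∀ i : Int, j ≤ i → i ≤ p.1 →
          pvIncF arr i + pvDecF arr n i - 1 ≤ p.1 - (s - 1) := by
        intro i hi1 hi2
        have h1 := pvIncF_chain arr (i - j).toNat j i (by omega) (by omega)
        have h2 := pvDecF_chain arr n (p.1 - i).toNat i p.1 (by omega) (by omega)
        omega
      have hsmax : pvSmax arr n j = max (p.1 - (s - 1)) (pvSmax arr n p.1) := by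
        apply le_antisymm
        · exact pvSmax_le arr n _ (p.1 - j).toNat j p.1 (by omega) (by omega) (by omega) hbound
        · apply max_le
          · rw [← hV]
            exact pvSmax_ge arr n j j1 (by omega) (by omega)
          · exact pvSmax_mono arr n j p.1 (by omega) (by omega)
      by_cases hend : p.1 < n - 1
      · have hrec := ih p.1 p.2 (max maxLen (p.1 - (s - 1)))
          (by omega) (by omega) (by omega) hend hd5
        rw [hrec, hsmax, max_assoc]
      · rw [pvAOuter_exit arr n _ _ _ _ fuel (by omega)]
        have hlast : pvSmax arr n p.1 ≤ p.1 - (s - 1) := by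
          have hsp : pvSmax arr n p.1 = pvIncF arr p.1 + pvDecF arr n p.1 - 1 := by
            rw [pvSmax, dif_neg (by omega)]
          rw [hsp]
          exact hbound p.1 (by omega) (by omega)
        rw [hsmax, show max (p.1 - (s - 1)) (pvSmax arr n p.1) = p.1 - (s - 1) from by omega]

-- ===== B-side characterisation =====

def pvIncList (arr : List Int) (m : Nat) : List Int :=
  (List.range m).map (fun k : Nat => pvIncF arr (k : Int))

theorem pvIncList_get (arr : List Int) (m : Nat) (i : Int) (h0 : 0 ≤ i) (h : i < (m : Int)) :
    PySem.List.pyGetD (pvIncList arr m) i 0 = pvIncF arr i := by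
  rw [show i = ((i.toNat : Nat) : Int) from by omega, PySem.List.pyGetD_natCast]
  unfold pvIncList
  rw [PySem.List.getD_map_range _ _ _ _ (by omega)]

-- the first loop of B builds incList and leaves up = incF (m-1)
theorem pvFold1 (arr : List Int) : ∀ (m : Nat),
    (PySem.List.pyRange 0 ((m : Int) + 1) 1).foldl
      (fun (st : List Int × Int) i =>
        let up := if 0 < i ∧ PySem.List.pyGetD arr (i - 1) 0 ≤ PySem.List.pyGetD arr i 0
                  then st.2 + 1 else 1
        (st.1 ++ [up], up)) ([], 0)
    = (pvIncList arr (m + 1), pvIncF arr (m : Int)) := by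
  intro m
  induction m with
  | zero =>
      rw [show ((0 : Nat) : Int) + 1 = 0 + 1 from by norm_num, PySem.List.pyRange_one_singleton]
      simp only [List.foldl_cons, List.foldl_nil]
      rw [if_neg (by omega)]
      unfold pvIncList
      simp [List.range_succ,
        show pvIncF arr (0 : Int) = 1 from by rw [pvIncF, dif_neg (by omega)]]
  | succ m ih =>
      rw [show ((m + 1 : Nat) : Int) = (m : Int) + 1 from by push_cast; ring]
      rw [PySem.List.pyRange_one_succ_right (by omega), List.foldl_append, ih]
      simp only [List.foldl_cons, List.foldl_nil]
      have hup : (if 0 < (m : Int) + 1 ∧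
          PySem.List.pyGetD arr ((m : Int) + 1 - 1) 0 ≤ PySem.List.pyGetD arr ((m : Int) + 1) 0
          then pvIncF arr (m : Int) + 1 else 1) = pvIncF arr ((m : Int) + 1) := by
        rw [pvIncF.eq_def arr ((m : Int) + 1)]
        by_cases hc : 0 < (m : Int) + 1 ∧
            PySem.List.pyGetD arr ((m : Int) + 1 - 1) 0 ≤ PySem.List.pyGetD arr ((m : Int) + 1) 0
        · rw [if_pos hc, dif_pos hc, show (m : Int) + 1 - 1 = (m : Int) from by ring]
        · rw [if_neg hc, dif_neg hc]
      rw [hup]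
      unfold pvIncList
      rw [List.range_succ (n := m + 1), List.map_append]
      simp only [List.map_cons, List.map_nil]
      rw [show ((m + 1 : Nat) : Int) = (m : Int) + 1 from by push_cast; ring]

-- wrapper stating pvFold1 with the Int bound n
theorem pvFold1' (arr : List Int) (n : Int) (h : 1 ≤ n) :
    (PySem.List.pyRange 0 n 1).foldl
      (fun (st : List Int × Int) i =>
        let up := if 0 < i ∧ PySem.List.pyGetD arr (i - 1) 0 ≤ PySem.List.pyGetD arr i 0
                  then st.2 + 1 else 1
        (st.1 ++ [up], up)) ([], 0)
    = (pvIncList arr n.toNat, pvIncF arr (n - 1)) := by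
  have hmain := pvFold1 arr (n.toNat - 1)
  rw [show ((n.toNat - 1 : Nat) : Int) + 1 = n from by omega] at hmain
  rw [hmain, show n.toNat - 1 + 1 = n.toNat from by omega,
    show ((n.toNat - 1 : Nat) : Int) = n - 1 from by omega]

-- the second loop of B computes a running prefix max of incF i + decF i - 1
theorem pvFold2 (arr : List Int) (n : Int) (incL : List Int)
    (hinc : ∀ i : Int, 0 ≤ i → i < n → PySem.List.pyGetD incL i 0 = pvIncF arr i) :
    ∀ (m : Nat) (b d : Int), (m : Int) ≤ n - 1 →
    ((m : Int) = n - 1 ∨ d = pvDecF arr n ((m : Int) + 1)) →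
    ((PySem.List.pyRange (m : Int) (-1) (-1)).foldl
      (fun (st : Int × Int) i =>
        let down := if i < n - 1 ∧ PySem.List.pyGetD arr i 0 ≥ PySem.List.pyGetD arr (i + 1) 0
                    then st.2 + 1 else 1
        (max st.1 (PySem.List.pyGetD incL i 0 + down - 1), down)) (b, d)).1
    = max b (pvPmax arr n (m : Int)) := by
  intro m
  induction m with
  | zero =>
      intro b d hle hd
      rw [PySem.List.pyRange_neg_one_cons (by omega),
        show ((0 : Nat) : Int) - 1 = -1 from by norm_num,
        PySem.List.pyRange_neg_one_eq_nil (by omega)]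
      simp only [List.foldl_cons, List.foldl_nil]
      have hdown : (if ((0 : Nat) : Int) < n - 1 ∧
          PySem.List.pyGetD arr ((0 : Nat) : Int) 0 ≥
            PySem.List.pyGetD arr (((0 : Nat) : Int) + 1) 0
          then d + 1 else 1) = pvDecF arr n ((0 : Nat) : Int) := by
        rcases hd with hd | hd
        · rw [if_neg (by omega), pvDecF, dif_neg (by omega)]
        · rw [pvDecF.eq_def arr n ((0 : Nat) : Int)]
          by_cases hc : ((0 : Nat) : Int) < n - 1 ∧
              PySem.List.pyGetD arr ((0 : Nat) : Int) 0 ≥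
                PySem.List.pyGetD arr (((0 : Nat) : Int) + 1) 0
          · rw [if_pos hc, dif_pos hc, hd]
          · rw [if_neg hc, dif_neg hc]
      rw [hdown, hinc _ (by omega) (by omega), pvPmax, dif_neg (by omega)]
  | succ m ih =>
      intro b d hle hd
      rw [PySem.List.pyRange_neg_one_cons (by omega)]
      simp only [List.foldl_cons]
      have hdown : (if ((m + 1 : Nat) : Int) < n - 1 ∧
          PySem.List.pyGetD arr ((m + 1 : Nat) : Int) 0 ≥
            PySem.List.pyGetD arr (((m + 1 : Nat) : Int) + 1) 0
          then d + 1 else 1) = pvDecF arr n ((m + 1 : Nat) : Int) := by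
        rcases hd with hd | hd
        · rw [if_neg (by omega), pvDecF, dif_neg (by omega)]
        · rw [pvDecF.eq_def arr n ((m + 1 : Nat) : Int)]
          by_cases hc : ((m + 1 : Nat) : Int) < n - 1 ∧
              PySem.List.pyGetD arr ((m + 1 : Nat) : Int) 0 ≥
                PySem.List.pyGetD arr (((m + 1 : Nat) : Int) + 1) 0
          · rw [if_pos hc, dif_pos hc, hd,
              show ((m + 1 : Nat) : Int) + 1 = ((m : Nat) : Int) + 1 + 1 from by push_cast; ring]
          · rw [if_neg hc, dif_neg hc]
      rw [hdown, hinc _ (by omega) (by omega),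
        show ((m + 1 : Nat) : Int) - 1 = ((m : Nat) : Int) from by push_cast; ring]
      rw [ih (max b (pvIncF arr ((m + 1 : Nat) : Int) + pvDecF arr n ((m + 1 : Nat) : Int) - 1))
        (pvDecF arr n ((m + 1 : Nat) : Int)) (by omega)
        (Or.inr (by rw [show ((m : Nat) : Int) + 1 = ((m + 1 : Nat) : Int) from by push_cast; ring]))]
      rw [pvPmax.eq_def arr n ((m + 1 : Nat) : Int), dif_pos (by push_cast; omega)]
      rw [show ((m + 1 : Nat) : Int) - 1 = ((m : Nat) : Int) from by push_cast; ring]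
      rw [max_assoc]

-- prefix max from the right end equals suffix max from the left end
theorem pvBridge (arr : List Int) (n : Int) (hn : 2 ≤ n) : ∀ (m : Nat), (m : Int) ≤ n - 2 →
    max (pvPmax arr n (m : Int)) (pvSmax arr n ((m : Int) + 1)) = pvSmax arr n 0 := by
  intro m
  induction m with
  | zero =>
      intro h
      rw [show ((0 : Nat) : Int) = 0 from by norm_num]
      rw [pvPmax.eq_def arr n 0, dif_neg (by omega)]
      rw [pvSmax.eq_def arr n 0, dif_pos (by omega)]
  | succ m ih =>
      intro h
      rw [show ((m + 1 : Nat) : Int) = (m : Int) + 1 from by push_cast; ring]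
      rw [pvPmax.eq_def arr n ((m : Int) + 1), dif_pos (by omega)]
      rw [show (m : Int) + 1 - 1 = (m : Int) from by ring]
      rw [max_comm (pvIncF arr ((m : Int) + 1) + pvDecF arr n ((m : Int) + 1) - 1)
        (pvPmax arr n (m : Int)), max_assoc]
      rw [show max (pvIncF arr ((m : Int) + 1) + pvDecF arr n ((m : Int) + 1) - 1)
          (pvSmax arr n ((m : Int) + 1 + 1)) = pvSmax arr n ((m : Int) + 1) from by
        rw [pvSmax.eq_def arr n ((m : Int) + 1), dif_pos (by omega)]]
      exact ih (by omega)

theorem pvPmax_top (arr : List Int) (n : Int) (hn : 2 ≤ n) :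
    pvPmax arr n (n - 1) = pvSmax arr n 0 := by
  have hb := pvBridge arr n hn (n.toNat - 2) (by omega)
  rw [show ((n.toNat - 2 : Nat) : Int) = n - 2 from by omega,
    show n - 2 + 1 = n - 1 from by ring] at hb
  rw [pvPmax.eq_def arr n (n - 1), dif_pos (by omega), show n - 1 - 1 = n - 2 from by ring]
  have hsm : pvSmax arr n (n - 1) = pvIncF arr (n - 1) + pvDecF arr n (n - 1) - 1 := by
    rw [pvSmax, dif_neg (by omega)]
  rw [← hsm, max_comm]
  exact hb

-- ===== VERDICT (by name: the statement is the Claim_ definition above) =====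
theorem find_max_bitonic_subarray_length_spec : Claim_equal_find_max_bitonic_subarray_length := by
  intro arr n hdom hpre
  unfold Spec_find_max_bitonic_subarray_length
  unfold find_max_bitonic_subarray_length find_max_bitonic_subarray_length_alt
  by_cases hn0 : n = 0
  · rw [if_pos hn0, if_pos hn0]
  rw [if_neg hn0, if_neg hn0]
  dsimp only
  by_cases hn2 : 2 ≤ n
  · -- main case
    rw [pvFold1' arr n (by omega)]
    dsimp only
    rw [show (PySem.List.pyRange (n - 1) (-1) (-1)) =
        (PySem.List.pyRange ((n.toNat - 1 : Nat) : Int) (-1) (-1)) from by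
      rw [show ((n.toNat - 1 : Nat) : Int) = n - 1 from by omega]]
    rw [pvFold2 arr n (pvIncList arr n.toNat)
      (fun i h0 hlt => pvIncList_get arr n.toNat i h0 (by omega))
      (n.toNat - 1) 1 0 (by omega) (Or.inl (by omega))]
    rw [show ((n.toNat - 1 : Nat) : Int) = n - 1 from by omega]
    rw [pvPmax_top arr n hn2]
    rw [pvAOuter_eq arr n n.toNat 0 0 1 (by omega) (by omega) (by omega) (by omega)
      (by rw [pvIncF, dif_neg (by omega)]; norm_num)]
  · -- n ≤ 1, n ≠ 0: both sides are 1
    have hA : pvAOuter arr n 1 0 0 0 n.toNat = 1 :=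
      pvAOuter_exit arr n 1 0 0 0 n.toNat (by omega)
    rw [hA]
    by_cases hn1 : n = 1
    · subst hn1
      rw [show PySem.List.pyRange 0 (1 : Int) 1 = [0] from by decide]
      simp only [List.foldl_cons, List.foldl_nil]
      rw [if_neg (by omega)]
      rw [show (1 : Int) - 1 = 0 from by ring]
      rw [show PySem.List.pyRange (0 : Int) (-1) (-1) = [0] from by decide]
      simp only [List.foldl_cons, List.foldl_nil]
      rw [if_neg (by omega)]
      rw [show PySem.List.pyGetD ([] ++ [(1 : Int)]) 0 0 = 1 from rfl]
      norm_num
    · -- n < 0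
      rw [PySem.List.pyRange_one_eq_nil (by omega),
        PySem.List.pyRange_neg_one_eq_nil (by omega)]
      simp only [List.foldl_nil]
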